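-- pv_equiv track=rewrite | github.com/Hulyamr13/hackerrank | Mehta and his Laziness.py | solve
-- ===== SOURCE A (Python) =====
-- from math import isqrt, gcd
--
-- def is_even_perfect_square(n):
--     return (n % 2 == 0) and (isqrt(n) ** 2 == n)
--
-- def solve(n):
--     cd = 1
--     cepsd = 0
--     for d in range(2, isqrt(n) + 1):
--         if n % d == 0:
--             cd += 1
--             if is_even_perfect_square(d):
--                 cepsd += 1
--             dd = n // d
--             if dd == d:
--                 continue
--             cd += 1
--             if is_even_perfect_square(dd):
--                 cepsd += 1
--
--     if not cepsd:
--         return "0"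
--
--     res = f"{cepsd // gcd(cepsd, cd)}/{cd // gcd(cepsd, cd)}"
--     return res
-- ===== SOURCE B (Python) =====
-- from math import isqrt, gcd
--
-- def solve(n):
--     # closed-form counting: cd from the small-divisor count, cepsd by
--     # enumerating even perfect squares 4*j*j directly
--     if n < 2:
--         return "0"
--     r = isqrt(n)
--     small = sum(1 for d in range(1, r + 1) if n % d == 0)
--     cd = 2 * small - (1 if r * r == n else 0) - 1
--     cepsd = sum(1 for j in range(1, isqrt(n // 4) + 1) if n % (4 * j * j) == 0)
--     if n % 2 == 0 and r * r == n:
--         cepsd -= 1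
--     if cepsd == 0:
--         return "0"
--     g = gcd(cepsd, cd)
--     return f"{cepsd // g}/{cd // g}"
-- ===== Notes on version B (the rewrite author's own statement) =====
-- stated objective: alternative
-- what changed: Replaces A's single interleaved divisor-pair loop with two independent closed-form counts: the proper-divisor count obtained by doubling the number of small divisors (up to the square root) with square/self corrections, and the even-perfect-square divisor count obtained by enumerating the even perfect squares themselves instead of testing each divisor and cofactor.
import Mathlib
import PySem

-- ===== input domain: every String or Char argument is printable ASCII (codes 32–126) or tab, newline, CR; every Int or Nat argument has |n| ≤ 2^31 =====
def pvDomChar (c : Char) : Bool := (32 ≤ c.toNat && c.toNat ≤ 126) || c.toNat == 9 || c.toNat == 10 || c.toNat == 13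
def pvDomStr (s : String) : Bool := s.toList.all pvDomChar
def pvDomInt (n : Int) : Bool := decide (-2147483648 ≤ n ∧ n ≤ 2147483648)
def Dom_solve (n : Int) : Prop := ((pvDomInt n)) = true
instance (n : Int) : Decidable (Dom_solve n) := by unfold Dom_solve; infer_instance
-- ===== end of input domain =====

-- B replaces A's interleaved divisor-pair loop by two independent closed-form
-- counts (an alternative decomposition of the same O(sqrt n) cost); return values
-- agree on all n ≥ 0 (A raises ValueError on n < 0, excluded by Pre_).

-- ===== PORT A =====
-- math.isqrt for n ≥ 0 (exact there; Python raises ValueError on n < 0, outside Pre_)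
def pyIsqrt (n : Int) : Int := (Nat.sqrt n.toNat : Int)

-- helper is_even_perfect_square; applied to nonnegative arguments only in both ports
def isEvenPerfectSquare (m : Int) : Bool :=
  (PySem.Int.mod m 2 == 0) && (pyIsqrt m ^ 2 == m)

-- the body of A's for-loop over d, state (cd, cepsd)
def solveStep (n : Int) (s : Int × Int) (d : Int) : Int × Int :=
  if PySem.Int.mod n d = 0 then
    let cd := s.1 + 1
    let cepsd := if isEvenPerfectSquare d then s.2 + 1 else s.2
    let dd := PySem.Int.floordiv n d
    if dd = d then (cd, cepsd)
    else (cd + 1, if isEvenPerfectSquare dd then cepsd + 1 else cepsd)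
  else s

def solve (n : Int) : String :=
  let p := (PySem.List.pyRange 2 (pyIsqrt n + 1)).foldl (solveStep n) (1, 0)
  if p.2 = 0 then "0"
  else
    PySem.Int.toStr (PySem.Int.floordiv p.2 (Int.gcd p.2 p.1)) ++ "/" ++
      PySem.Int.toStr (PySem.Int.floordiv p.1 (Int.gcd p.2 p.1))

-- ===== PORT B =====
def solve_alt (n : Int) : String :=
  if n < 2 then "0"
  else
    let r := pyIsqrt n
    let small := (PySem.List.pyRange 1 (r + 1)).foldl
      (fun (acc : Int) d => if PySem.Int.mod n d = 0 then acc + 1 else acc) 0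
    let cd := 2 * small - (if r * r = n then 1 else 0) - 1
    let cepsd0 := (PySem.List.pyRange 1 (pyIsqrt (PySem.Int.floordiv n 4) + 1)).foldl
      (fun (acc : Int) j => if PySem.Int.mod n (4 * j * j) = 0 then acc + 1 else acc) 0
    let cepsd := if PySem.Int.mod n 2 = 0 ∧ r * r = n then cepsd0 - 1 else cepsd0
    if cepsd = 0 then "0"
    else
      let g : Int := Int.gcd cepsd cd
      PySem.Int.toStr (PySem.Int.floordiv cepsd g) ++ "/" ++
        PySem.Int.toStr (PySem.Int.floordiv cd g)

-- ===== PRECONDITION & SPEC =====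
-- A raises ValueError (math.isqrt) on negative n; Pre_ admits exactly the n where A returns.
def Pre_solve (n : Int) : Prop := 0 ≤ n
instance (n : Int) : Decidable (Pre_solve n) := by unfold Pre_solve; infer_instance
def pvWitness_solve : Int := (36)

def Spec_solve (n : Int) (out : String) : Prop := out = solve_alt n
instance (n : Int) (out : String) : Decidable (Spec_solve n out) := by unfold Spec_solve; infer_instance

-- ===== CLAIM (what is proved, stated in full; the proofs are below) =====
def Claim_equal_solve : Prop := ∀ (n : Int), Dom_solve n → Pre_solve n → Spec_solve n (solve n)

-- ===== LEMMAS AND PROOFS =====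

lemma pyRange_eq_nil_of_le {a b : Int} (h : b ≤ a) : PySem.List.pyRange a b = [] := by
  rw [List.eq_nil_iff_forall_not_mem]
  intro x hx
  rw [PySem.List.mem_pyRange_one] at hx
  omega

-- bridge: a sum over pyRange ↑a ↑b is a Finset sum over Ico a b
lemma mapSum_pyRange_Ico (f : Int → Int) (a b : Nat) :
    ((PySem.List.pyRange (a : Int) (b : Int)).map f).sum = ∑ d ∈ Finset.Ico a b, f (d : Int) := by
  induction b with
  | zero =>
    rw [pyRange_eq_nil_of_le (by positivity)]
    simp
  | succ b ih =>
    by_cases h : a ≤ b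
    · have hc : ((b : Nat) : Int) + 1 = ((b + 1 : Nat) : Int) := by push_cast; ring
      rw [← hc, PySem.List.pyRange_one_succ_right (by exact_mod_cast h)]
      rw [Finset.sum_Ico_succ_top h]
      simp [ih]
    · rw [pyRange_eq_nil_of_le (by exact_mod_cast Nat.succ_le_of_lt (by omega)),
        Finset.Ico_eq_empty (by omega)]
      simp

-- a counting loop over pyRange ↑a ↑b is a Finset card
lemma count_fold_eq (p : Int → Prop) [DecidablePred p] (P : Nat → Prop) [DecidablePred P]
    (a b : Nat) (hpt : ∀ d : Nat, p (d : Int) ↔ P d) :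
    (PySem.List.pyRange (a : Int) (b : Int)).foldl
        (fun (acc : Int) d => if p d then acc + 1 else acc) 0
      = ((Finset.Ico a b).filter P).card := by
  rw [PySem.List.foldl_ite_add_one, zero_add, ← PySem.List.sum_map_ite_one_zero,
    mapSum_pyRange_Ico]
  have hci : ∀ d ∈ Finset.Ico a b,
      (if (decide (p (d : Int))) = true then (1 : Int) else 0) = if P d then 1 else 0 := by
    intro d _
    simp [hpt d]
  rw [Finset.sum_congr rfl hci, Finset.sum_boole]

-- A's per-element contributions to cd and to cepsd
def fA (n d : Int) : Int :=
  if PySem.Int.mod n d = 0 then (if PySem.Int.floordiv n d = d then 1 else 2) else 0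

def gA (n d : Int) : Int :=
  if PySem.Int.mod n d = 0 then
    ((if isEvenPerfectSquare d then 1 else 0) +
     (if PySem.Int.floordiv n d = d then 0
      else if isEvenPerfectSquare (PySem.Int.floordiv n d) then 1 else 0))
  else 0

lemma solveStep_split (n : Int) (l : List Int) (a b : Int) :
    l.foldl (solveStep n) (a, b) = (a + (l.map (fA n)).sum, b + (l.map (gA n)).sum) := by
  induction l generalizing a b with
  | nil => simp
  | cons d t ih =>
    simp only [List.foldl_cons, List.map_cons, List.sum_cons]
    have hstep : solveStep n (a, b) d = (a + fA n d, b + gA n d) := by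
      simp only [solveStep, fA, gA]
      split_ifs <;> simp [Prod.ext_iff] <;> omega
    rw [hstep, ih]
    rw [Prod.mk.injEq]
    constructor <;> ring

-- even perfect square on ℕ (reducible so Decidable is inferred in filters)
abbrev EpsdN (e : Nat) : Prop := e % 2 = 0 ∧ Nat.sqrt e * Nat.sqrt e = e

def fNat (m d : Nat) : Int :=
  if m % d = 0 then (if m / d = d then 1 else 2) else 0

lemma filter_sq {m : Nat} (hm : 2 ≤ m) :
    (Finset.Ico 2 (Nat.sqrt m + 1)).filter (fun d => m % d = 0 ∧ m / d = d)
      = if Nat.sqrt m * Nat.sqrt m = m then {Nat.sqrt m} else ∅ := by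
  ext d
  simp only [Finset.mem_filter, Finset.mem_Ico]
  constructor
  · rintro ⟨⟨h2, hr⟩, hmod, hdiv⟩
    have hdvd : d ∣ m := Nat.dvd_of_mod_eq_zero hmod
    have hdd : d * d = m := by
      conv_rhs => rw [← Nat.div_mul_cancel hdvd]
      rw [hdiv]
    have hle : d ≤ Nat.sqrt m := Nat.le_sqrt.2 (le_of_eq hdd)
    have hge : Nat.sqrt m ≤ d := by
      have h1 := Nat.sqrt_le' m
      rw [pow_two] at h1
      exact Nat.mul_self_le_mul_self_iff.1 (le_of_le_of_eq h1 hdd.symm)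
    have hdr : d = Nat.sqrt m := le_antisymm hle hge
    rw [if_pos (by rw [← hdr]; exact hdd)]
    simp [hdr]
  · intro hd
    by_cases hsq : Nat.sqrt m * Nat.sqrt m = m
    · rw [if_pos hsq] at hd
      simp only [Finset.mem_singleton] at hd
      subst hd
      have hr2 : 2 ≤ Nat.sqrt m := by
        by_contra h
        interval_cases h' : Nat.sqrt m <;> omega
      have hdvd : Nat.sqrt m ∣ m := ⟨Nat.sqrt m, hsq.symm⟩
      refine ⟨⟨hr2, by omega⟩, Nat.mod_eq_zero_of_dvd hdvd, ?_⟩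
      have hc : Nat.sqrt m * Nat.sqrt m / Nat.sqrt m = Nat.sqrt m := by rw [Nat.mul_div_assoc _ dvd_rfl, Nat.div_self (by omega : 0 < Nat.sqrt m), Nat.mul_one]
      rw [hsq] at hc
      exact hc
    · rw [if_neg hsq] at hd
      simp at hd

lemma sum_two_ite (s : Finset ℕ) (p : ℕ → Prop) [DecidablePred p] :
    (∑ d ∈ s, if p d then (2:ℤ) else 0) = 2 * (s.filter p).card := by
  have : ∀ d ∈ s, (if p d then (2:ℤ) else 0) = 2 * (if p d then 1 else 0) := by
    intro d _; split_ifs <;> ring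
  rw [Finset.sum_congr rfl this, ← Finset.mul_sum, Finset.sum_boole]

lemma core1 {m : Nat} (hm : 2 ≤ m) :
    (∑ d ∈ Finset.Ico 2 (Nat.sqrt m + 1), fNat m d)
      + (if Nat.sqrt m * Nat.sqrt m = m then (1 : Int) else 0)
      = 2 * ((Finset.Ico 2 (Nat.sqrt m + 1)).filter (fun d => m % d = 0)).card := by
  have hpt : ∀ d ∈ Finset.Ico 2 (Nat.sqrt m + 1),
      fNat m d = (if m % d = 0 then (2 : Int) else 0)
        - (if m % d = 0 ∧ m / d = d then 1 else 0) := by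
    intro d _
    unfold fNat
    split_ifs <;> simp_all
  rw [Finset.sum_congr rfl hpt, Finset.sum_sub_distrib, sum_two_ite, Finset.sum_boole,
    filter_sq hm]
  split_ifs <;> simp

lemma core0 {m : Nat} (hm : 2 ≤ m) :
    ((Finset.Ico 1 (Nat.sqrt m + 1)).filter (fun d => m % d = 0)).card
      = ((Finset.Ico 2 (Nat.sqrt m + 1)).filter (fun d => m % d = 0)).card + 1 := by
  have hr1 : 1 ≤ Nat.sqrt m := Nat.le_sqrt.2 (by omega)
  have hins : Finset.Ico 1 (Nat.sqrt m + 1) = insert 1 (Finset.Ico 2 (Nat.sqrt m + 1)) := by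
    ext x
    simp only [Finset.mem_Ico, Finset.mem_insert]
    omega
  rw [hins, Finset.filter_insert, if_pos (Nat.mod_one m), Finset.card_insert_of_notMem (by simp [Finset.mem_Ico])]

def gNat (m d : Nat) : Int :=
  if m % d = 0 then
    ((if EpsdN d then 1 else 0) +
     (if m / d = d then 0 else if EpsdN (m / d) then 1 else 0))
  else 0

-- even perfect squares e have e = 4*j*j with j = sqrt e / 2
lemma epsd_form {e : Nat} (he : EpsdN e) (he0 : e ≠ 0) :
    2 ≤ Nat.sqrt e ∧ Nat.sqrt e % 2 = 0 ∧ 4 * (Nat.sqrt e / 2) * (Nat.sqrt e / 2) = e := by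
  obtain ⟨hev, hsq⟩ := he
  have hk0 : Nat.sqrt e ≠ 0 := by
    intro h; rw [h] at hsq; omega
  have hkev : Nat.sqrt e % 2 = 0 := by
    rcases Nat.even_mul.1 (by rw [hsq]; exact Nat.even_iff.2 hev) with h | h <;>
      exact Nat.even_iff.1 h
  refine ⟨by omega, hkev, ?_⟩
  have : 2 * (Nat.sqrt e / 2) = Nat.sqrt e := by omega
  calc 4 * (Nat.sqrt e / 2) * (Nat.sqrt e / 2)
      = (2 * (Nat.sqrt e / 2)) * (2 * (Nat.sqrt e / 2)) := by ring
    _ = e := by rw [this]; exact hsq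

lemma epsd_4jj (j : Nat) : EpsdN (4 * j * j) := by
  have h4 : 4 * j * j = (2 * j) ^ 2 := by ring
  constructor
  · have h2 : 4 * j * j = 2 * (2 * j * j) := by ring
    omega
  · rw [h4, Nat.sqrt_eq']; ring

-- step 6: even-perfect-square divisors of m biject with j ∈ [1, sqrt(m/4)] with 4j² ∣ m
lemma card_epsd_divisors {m : Nat} (hm : 2 ≤ m) :
    (m.divisors.filter (fun e => EpsdN e)).card
      = ((Finset.Ico 1 (Nat.sqrt (m / 4) + 1)).filter (fun j => m % (4 * j * j) = 0)).card := by
  apply Finset.card_nbij' (fun e => Nat.sqrt e / 2) (fun j => 4 * j * j)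
  · intro e he
    simp only [Finset.coe_filter, Set.mem_setOf_eq, Nat.mem_divisors] at he ⊢
    obtain ⟨⟨hdvd, hm0⟩, heps⟩ := he
    have he0 : e ≠ 0 := by rintro rfl; exact hm0 (Nat.eq_zero_of_zero_dvd hdvd)
    obtain ⟨hk2, hkev, hform⟩ := epsd_form heps he0
    simp only [Finset.mem_Ico]
    have hle : e ≤ m := Nat.le_of_dvd (by omega) hdvd
    refine ⟨⟨by omega, ?_⟩, ?_⟩
    · have hjj : (Nat.sqrt e / 2) * (Nat.sqrt e / 2) ≤ m / 4 :=
        (Nat.le_div_iff_mul_le (by omega)).2 (by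
          rw [show (Nat.sqrt e / 2) * (Nat.sqrt e / 2) * 4
              = 4 * (Nat.sqrt e / 2) * (Nat.sqrt e / 2) from by ring, hform]
          exact hle)
      have := Nat.le_sqrt.2 hjj
      omega
    · rw [hform]; exact Nat.mod_eq_zero_of_dvd hdvd
  · intro j hj
    simp only [Finset.coe_filter, Set.mem_setOf_eq, Finset.mem_Ico] at hj ⊢
    obtain ⟨⟨hj1, _⟩, hmod⟩ := hj
    simp only [Nat.mem_divisors]
    exact ⟨⟨Nat.dvd_of_mod_eq_zero hmod, by omega⟩, epsd_4jj j⟩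
  · intro e he
    simp only [Finset.coe_filter, Set.mem_setOf_eq, Nat.mem_divisors] at he
    obtain ⟨⟨hdvd, hm0⟩, heps⟩ := he
    have he0 : e ≠ 0 := by rintro rfl; exact hm0 (Nat.eq_zero_of_zero_dvd hdvd)
    exact (epsd_form heps he0).2.2
  · intro j hj
    simp only [Finset.coe_filter, Set.mem_setOf_eq, Finset.mem_Ico] at hj
    show Nat.sqrt (4 * j * j) / 2 = j
    have h4 : 4 * j * j = (2 * j) ^ 2 := by ring
    rw [h4, Nat.sqrt_eq']
    omega

-- step 5: drop m itself from the even-perfect-square divisors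
lemma card_epsd_proper {m : Nat} (hm : 2 ≤ m) :
    ((m.divisors.filter (fun e => EpsdN e ∧ e ≠ m)).card : Int)
      + (if EpsdN m then (1 : Int) else 0)
      = (m.divisors.filter (fun e => EpsdN e)).card := by
  by_cases hE : EpsdN m
  · have hmem : m ∈ m.divisors.filter (fun e => EpsdN e) := by
      simp [Nat.mem_divisors]
      omega
    have herase : m.divisors.filter (fun e => EpsdN e ∧ e ≠ m)
        = (m.divisors.filter (fun e => EpsdN e)).erase m := by
      ext e
      simp only [Finset.mem_filter, Finset.mem_erase]
      tauto
    rw [herase, if_pos hE]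
    have hc := Finset.card_erase_of_mem hmem
    have hpos : 1 ≤ (m.divisors.filter (fun e => EpsdN e)).card :=
      Finset.card_pos.2 ⟨m, hmem⟩
    rw [hc]
    omega
  · have hsame : m.divisors.filter (fun e => EpsdN e ∧ e ≠ m)
        = m.divisors.filter (fun e => EpsdN e) := by
      apply Finset.filter_congr
      intro e he
      constructor
      · rintro ⟨h, _⟩; exact h
      · intro h
        refine ⟨h, ?_⟩
        rintro rfl
        exact hE h
    rw [hsame, if_neg hE, add_zero]

-- step 2: small even-perfect-square divisors are exactly those found directly
lemma small_eq {m : Nat} (hm : 2 ≤ m) :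
    (Finset.Ico 2 (Nat.sqrt m + 1)).filter (fun d => m % d = 0 ∧ EpsdN d)
      = m.divisors.filter (fun e => (EpsdN e ∧ e ≠ m) ∧ e ≤ Nat.sqrt m) := by
  have hrm : Nat.sqrt m < m := Nat.sqrt_lt_self (by omega)
  ext d
  simp only [Finset.mem_filter, Finset.mem_Ico, Nat.mem_divisors]
  constructor
  · rintro ⟨⟨h2, hr⟩, hmod, heps⟩
    exact ⟨⟨Nat.dvd_of_mod_eq_zero hmod, by omega⟩, ⟨⟨heps, by omega⟩, by omega⟩⟩
  · rintro ⟨⟨hdvd, hm0⟩, ⟨⟨heps, hne⟩, hle⟩⟩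
    have hd0 : d ≠ 0 := by rintro rfl; exact hm0 (Nat.eq_zero_of_zero_dvd hdvd)
    have hd2 : 2 ≤ d := by
      have := heps.1
      omega
    exact ⟨⟨hd2, by omega⟩, Nat.mod_eq_zero_of_dvd hdvd, heps⟩

-- step 3: large even-perfect-square divisors are found as cofactors m / d
lemma large_card_eq {m : Nat} (hm : 2 ≤ m) :
    ((Finset.Ico 2 (Nat.sqrt m + 1)).filter
        (fun d => m % d = 0 ∧ ¬(m / d = d) ∧ EpsdN (m / d))).card
      = (m.divisors.filter (fun e => (EpsdN e ∧ e ≠ m) ∧ ¬(e ≤ Nat.sqrt m))).card := by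
  have hsq : Nat.sqrt m * Nat.sqrt m ≤ m := by
    have := Nat.sqrt_le' m
    rwa [pow_two] at this
  have hsq' : m < (Nat.sqrt m + 1) * (Nat.sqrt m + 1) := by
    have := Nat.lt_succ_sqrt' m
    rwa [pow_two] at this
  apply Finset.card_nbij' (fun d => m / d) (fun e => m / e)
  · intro d hd
    simp only [Finset.coe_filter, Set.mem_setOf_eq, Finset.mem_Ico] at hd ⊢
    obtain ⟨⟨h2, hr⟩, hmod, hne, heps⟩ := hd
    have hdvd : d ∣ m := Nat.dvd_of_mod_eq_zero hmod
    have hprod : d * (m / d) = m := Nat.mul_div_cancel' hdvd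
    have hq1 : 1 ≤ m / d := by
      rcases Nat.eq_zero_or_pos (m / d) with h | h
      · rw [h, Nat.mul_zero] at hprod; omega
      · exact h
    have hbig : Nat.sqrt m < m / d := by
      by_contra hle
      rw [Nat.not_lt] at hle
      have hm_le : m ≤ Nat.sqrt m * Nat.sqrt m := by
        calc m = d * (m / d) := hprod.symm
          _ ≤ Nat.sqrt m * Nat.sqrt m := Nat.mul_le_mul (by omega) hle
      have hmeq : m = Nat.sqrt m * Nat.sqrt m := le_antisymm hm_le hsq
      have hdr : d = Nat.sqrt m := by
        by_contra hdne
        have hdlt : d < Nat.sqrt m := by omega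
        have : d * (m / d) < Nat.sqrt m * (m / d) := Nat.mul_lt_mul_of_lt_of_le hdlt (le_refl _) (by omega)
        have h2' : Nat.sqrt m * (m / d) ≤ Nat.sqrt m * Nat.sqrt m := Nat.mul_le_mul_left _ hle
        omega
      apply hne
      rw [hdr]
      have hc : Nat.sqrt m * Nat.sqrt m / Nat.sqrt m = Nat.sqrt m := by
        rw [Nat.mul_div_assoc _ dvd_rfl, Nat.div_self (by omega : 0 < Nat.sqrt m), Nat.mul_one]
      calc m / Nat.sqrt m = Nat.sqrt m * Nat.sqrt m / Nat.sqrt m := by rw [← hmeq]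
        _ = Nat.sqrt m := hc
    simp only [Nat.mem_divisors]
    refine ⟨⟨Nat.div_dvd_of_dvd hdvd, by omega⟩, ⟨heps, ?_⟩, by omega⟩
    intro hem
    rw [hem] at hprod
    nlinarith
  · intro e he
    simp only [Finset.coe_filter, Set.mem_setOf_eq, Nat.mem_divisors] at he ⊢
    obtain ⟨⟨hdvd, hm0⟩, ⟨heps, hnem⟩, hbig⟩ := he
    rw [Nat.not_le] at hbig
    have hprod : e * (m / e) = m := Nat.mul_div_cancel' hdvd
    have he0 : 0 < e := by
      rcases Nat.eq_zero_or_pos e with h | h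
      · subst h; rw [Nat.zero_mul] at hprod; omega
      · exact h
    have hq1 : 1 ≤ m / e := by
      rcases Nat.eq_zero_or_pos (m / e) with h | h
      · rw [h, Nat.mul_zero] at hprod; omega
      · exact h
    have hqne : m / e ≠ e := by
      intro h
      have : e * e ≤ m := by rw [← hprod, h]
      have : e ≤ Nat.sqrt m := Nat.le_sqrt.2 this
      omega
    have hqlt : m / e < e := by
      by_contra hge
      rw [Nat.not_lt] at hge
      have : e * e ≤ e * (m / e) := Nat.mul_le_mul_left _ hge
      have he_sq : e * e ≤ m := by omega
      have : e ≤ Nat.sqrt m := Nat.le_sqrt.2 he_sq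
      omega
    have hqr : m / e ≤ Nat.sqrt m := by
      apply Nat.le_sqrt.2
      calc m / e * (m / e) ≤ m / e * e := Nat.mul_le_mul_left _ (by omega)
        _ = m := by rw [Nat.mul_comm]; exact hprod
    have hq2 : 2 ≤ m / e := by
      rcases Nat.lt_or_ge (m / e) 2 with h | h
      · have h1 : m / e = 1 := by omega
        rw [h1, Nat.mul_one] at hprod
        omega
      · exact h
    have hdd : m / (m / e) = e := Nat.div_div_self hdvd hm0
    simp only [Finset.mem_Ico]
    refine ⟨⟨hq2, by omega⟩, Nat.mod_eq_zero_of_dvd (Nat.div_dvd_of_dvd hdvd), ?_, ?_⟩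
    · rw [hdd]; omega
    · rw [hdd]; exact heps
  · intro d hd
    simp only [Finset.coe_filter, Set.mem_setOf_eq, Finset.mem_Ico] at hd
    exact Nat.div_div_self (Nat.dvd_of_mod_eq_zero hd.2.1) (by omega)
  · intro e he
    simp only [Finset.coe_filter, Set.mem_setOf_eq, Nat.mem_divisors] at he
    exact Nat.div_div_self he.1.1 he.1.2

lemma core2 {m : Nat} (hm : 2 ≤ m) :
    (∑ d ∈ Finset.Ico 2 (Nat.sqrt m + 1), gNat m d)
      + (if EpsdN m then (1 : Int) else 0)
      = ((Finset.Ico 1 (Nat.sqrt (m / 4) + 1)).filter (fun j => m % (4 * j * j) = 0)).card := by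
  have hpt : ∀ d ∈ Finset.Ico 2 (Nat.sqrt m + 1),
      gNat m d = (if m % d = 0 ∧ EpsdN d then (1 : Int) else 0)
        + (if m % d = 0 ∧ ¬(m / d = d) ∧ EpsdN (m / d) then 1 else 0) := by
    intro d _
    unfold gNat
    split_ifs <;> simp_all
  rw [Finset.sum_congr rfl hpt, Finset.sum_add_distrib, Finset.sum_boole, Finset.sum_boole]
  have hsmall := small_eq hm
  have hlarge := large_card_eq hm
  rw [hsmall, hlarge]
  have hsplit :
      (m.divisors.filter (fun e => (EpsdN e ∧ e ≠ m) ∧ e ≤ Nat.sqrt m)).card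
        + (m.divisors.filter (fun e => (EpsdN e ∧ e ≠ m) ∧ ¬(e ≤ Nat.sqrt m))).card
      = (m.divisors.filter (fun e => EpsdN e ∧ e ≠ m)).card := by
    have h := Finset.card_filter_add_card_filter_not
      (s := m.divisors.filter (fun e => EpsdN e ∧ e ≠ m)) (p := fun e => e ≤ Nat.sqrt m)
    rwa [Finset.filter_filter, Finset.filter_filter] at h
  have := card_epsd_proper hm
  rw [card_epsd_divisors hm] at this
  omega


-- ===== CAST BRIDGES (ℤ ports at ↑m compute the ℕ quantities) =====

lemma pyIsqrt_natCast (m : Nat) : pyIsqrt (m : Int) = (Nat.sqrt m : Int) := by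
  simp [pyIsqrt]

lemma mod_natCast_zero_iff (m d : Nat) : PySem.Int.mod (m : Int) (d : Int) = 0 ↔ m % d = 0 := by
  rw [PySem.Int.mod_natCast]
  exact_mod_cast Iff.rfl

lemma ieps_iff (e : Nat) : isEvenPerfectSquare (e : Int) = true ↔ EpsdN e := by
  have h2 : PySem.Int.mod (e : Int) 2 = ((e % 2 : Nat) : Int) := by
    exact_mod_cast PySem.Int.mod_natCast e 2
  simp only [isEvenPerfectSquare, h2, pyIsqrt, Int.toNat_natCast, Bool.and_eq_true, beq_iff_eq,
    EpsdN]
  constructor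
  · rintro ⟨ha, hb⟩
    refine ⟨by exact_mod_cast ha, ?_⟩
    rw [pow_two] at hb
    exact_mod_cast hb
  · rintro ⟨ha, hb⟩
    refine ⟨by exact_mod_cast ha, ?_⟩
    rw [pow_two]
    exact_mod_cast hb

lemma fA_nat (m d : Nat) : fA (m : Int) (d : Int) = fNat m d := by
  simp only [fA, fNat, mod_natCast_zero_iff, PySem.Int.floordiv_natCast, Nat.cast_inj]

lemma gA_nat (m d : Nat) : gA (m : Int) (d : Int) = gNat m d := by
  simp only [gA, gNat, mod_natCast_zero_iff, PySem.Int.floordiv_natCast, Nat.cast_inj,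
    ieps_iff]

-- ===== MAIN EQUALITY =====

lemma solve_eq_of_two_le (m : Nat) (hm : 2 ≤ m) : solve (m : Int) = solve_alt (m : Int) := by
  have hiq : pyIsqrt (m : Int) = (Nat.sqrt m : Int) := pyIsqrt_natCast m
  -- A's loop
  have hpair : (PySem.List.pyRange 2 (pyIsqrt (m : Int) + 1)).foldl (solveStep (m : Int)) (1, 0)
      = ((1 : Int) + ∑ d ∈ Finset.Ico 2 (Nat.sqrt m + 1), fNat m d,
         (0 : Int) + ∑ d ∈ Finset.Ico 2 (Nat.sqrt m + 1), gNat m d) := by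
    rw [hiq, show ((Nat.sqrt m : Int) + 1) = ((Nat.sqrt m + 1 : Nat) : Int) from by push_cast; ring,
      show (2 : Int) = ((2 : Nat) : Int) from by norm_num, solveStep_split,
      mapSum_pyRange_Ico, mapSum_pyRange_Ico,
      Finset.sum_congr rfl (fun d _ => fA_nat m d), Finset.sum_congr rfl (fun d _ => gA_nat m d)]
  -- B's two counting loops
  have hsmall : (PySem.List.pyRange 1 (pyIsqrt (m : Int) + 1)).foldl
        (fun (acc : Int) d => if PySem.Int.mod (m : Int) d = 0 then acc + 1 else acc) 0
      = (((Finset.Ico 1 (Nat.sqrt m + 1)).filter (fun d => m % d = 0)).card : Int) := by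
    rw [hiq, show ((Nat.sqrt m : Int) + 1) = ((Nat.sqrt m + 1 : Nat) : Int) from by push_cast; ring,
      show (1 : Int) = ((1 : Nat) : Int) from by norm_num]
    exact count_fold_eq _ _ _ _ (fun d => mod_natCast_zero_iff m d)
  have hjs : (PySem.List.pyRange 1 (pyIsqrt (PySem.Int.floordiv (m : Int) 4) + 1)).foldl
        (fun (acc : Int) j => if PySem.Int.mod (m : Int) (4 * j * j) = 0 then acc + 1 else acc) 0
      = (((Finset.Ico 1 (Nat.sqrt (m / 4) + 1)).filter (fun j => m % (4 * j * j) = 0)).card : Int) := by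
    have hf4 : PySem.Int.floordiv (m : Int) 4 = ((m / 4 : Nat) : Int) := by
      exact_mod_cast PySem.Int.floordiv_natCast m 4
    rw [hf4, pyIsqrt_natCast,
      show ((Nat.sqrt (m / 4) : Int) + 1) = ((Nat.sqrt (m / 4) + 1 : Nat) : Int) from by push_cast; ring,
      show (1 : Int) = ((1 : Nat) : Int) from by norm_num]
    refine count_fold_eq _ _ _ _ (fun j => ?_)
    have hc : (4 : Int) * (j : Int) * (j : Int) = ((4 * j * j : Nat) : Int) := by push_cast; ring
    rw [hc]
    exact mod_natCast_zero_iff m (4 * j * j)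
  -- the numeric values agree
  have hcd : (1 : Int) + ∑ d ∈ Finset.Ico 2 (Nat.sqrt m + 1), fNat m d
      = 2 * (((Finset.Ico 1 (Nat.sqrt m + 1)).filter (fun d => m % d = 0)).card : Int)
        - (if (Nat.sqrt m : Int) * (Nat.sqrt m : Int) = (m : Int) then 1 else 0) - 1 := by
    have h1 := core1 hm
    have h0 := core0 hm
    have hiff : ((Nat.sqrt m : Int) * (Nat.sqrt m : Int) = (m : Int)) ↔ Nat.sqrt m * Nat.sqrt m = m := by
      exact_mod_cast Iff.rfl
    rw [h0]
    by_cases hsq : Nat.sqrt m * Nat.sqrt m = m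
    · rw [if_pos (hiff.2 hsq)]
      rw [if_pos hsq] at h1
      push_cast at h1 ⊢
      omega
    · rw [if_neg (fun h => hsq (hiff.1 h))]
      rw [if_neg hsq] at h1
      push_cast at h1 ⊢
      omega
  have hcond : (PySem.Int.mod (m : Int) 2 = 0 ∧ (Nat.sqrt m : Int) * (Nat.sqrt m : Int) = (m : Int))
      ↔ EpsdN m := by
    have h2 : PySem.Int.mod (m : Int) 2 = 0 ↔ m % 2 = 0 := by
      have hb := mod_natCast_zero_iff m 2
      rwa [show ((2 : Nat) : Int) = (2 : Int) from by norm_num] at hb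
    constructor
    · rintro ⟨ha, hb⟩; exact ⟨h2.1 ha, by exact_mod_cast hb⟩
    · rintro ⟨ha, hb⟩; exact ⟨h2.2 ha, by exact_mod_cast hb⟩
  have hce : (0 : Int) + ∑ d ∈ Finset.Ico 2 (Nat.sqrt m + 1), gNat m d
      = (if PySem.Int.mod (m : Int) 2 = 0 ∧ (Nat.sqrt m : Int) * (Nat.sqrt m : Int) = (m : Int)
          then (((Finset.Ico 1 (Nat.sqrt (m / 4) + 1)).filter (fun j => m % (4 * j * j) = 0)).card : Int) - 1
          else (((Finset.Ico 1 (Nat.sqrt (m / 4) + 1)).filter (fun j => m % (4 * j * j) = 0)).card : Int)) := by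
    have h2 := core2 hm
    by_cases hE : EpsdN m
    · rw [if_pos (hcond.2 hE)]
      rw [if_pos hE] at h2
      omega
    · rw [if_neg (fun h => hE (hcond.1 h))]
      rw [if_neg hE] at h2
      omega
  -- assemble
  have hnot : ¬ ((m : Int) < 2) := by exact_mod_cast Nat.not_lt.2 hm
  simp only [solve, solve_alt, if_neg hnot]
  rw [hpair, hsmall, hjs, hcd, hce]
  rfl

set_option maxRecDepth 4000 in
theorem solve_spec : Claim_equal_solve := by
  intro n _ hpre
  unfold Spec_solve
  unfold Pre_solve at hpre
  obtain ⟨m, rfl⟩ : ∃ m : Nat, n = (m : Int) := ⟨n.toNat, (Int.toNat_of_nonneg hpre).symm⟩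
  by_cases h2 : 2 ≤ m
  · exact solve_eq_of_two_le m h2
  · have h01 : m = 0 ∨ m = 1 := by omega
    rcases h01 with rfl | rfl
    · rw [Nat.cast_zero]
      decide
    · rw [Nat.cast_one]
      decide
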